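-- pv_equiv track=rewrite | github.com/pypi-data/pypi-mirror-390 | packages/naludaq/naludaq-0.34.3.tar.gz/naludaq-0.34.3/src/naludaq/parsers/hiper_parser.py | split_data_into_packs
-- ===== SOURCE A (Python) =====
-- def split_data_into_packs(idata, splitword):
--     """Takes all the indata and splits into packs
--     A pack is from the header of the first(lowest number) chip until it's found again.
--     Args:
--         idata: All captured data.
--         splitword: header of the lowest numbered chip
--     Returns:
--         list of packs to process.
--     """
--     splits = []
--     running = True
--     p = idata.find(splitword)
--     while running:
--         p2 = idata.find(splitword, p + 1)
--         if p2 == -1: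
--             p2 = len(idata)
--             running = False
--         splits.append(idata[p:p2])
--         p = p2
--     return splits
-- ===== SOURCE B (Python) =====
-- def split_data_into_packs(idata, splitword):
--     """Two-pass rewrite: collect boundary positions first, then slice between
--     consecutive boundaries."""
--     positions = [idata.find(splitword)]
--     while True:
--         q = idata.find(splitword, positions[-1] + 1)
--         if q == -1:
--             break
--         positions.append(q)
--     positions.append(len(idata))
--     return [idata[positions[i]:positions[i + 1]] for i in range(len(positions) - 1)]
-- ===== Notes on version B (the rewrite author's own statement) =====
-- stated objective: alternative
-- what changed: B separates the work into two passes: first collect all boundary positions (first find, each subsequent find, then len), then build the packs by slicing between consecutive positions, instead of A's single loop that interleaves searching and slicing with a running flag.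
import Mathlib
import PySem

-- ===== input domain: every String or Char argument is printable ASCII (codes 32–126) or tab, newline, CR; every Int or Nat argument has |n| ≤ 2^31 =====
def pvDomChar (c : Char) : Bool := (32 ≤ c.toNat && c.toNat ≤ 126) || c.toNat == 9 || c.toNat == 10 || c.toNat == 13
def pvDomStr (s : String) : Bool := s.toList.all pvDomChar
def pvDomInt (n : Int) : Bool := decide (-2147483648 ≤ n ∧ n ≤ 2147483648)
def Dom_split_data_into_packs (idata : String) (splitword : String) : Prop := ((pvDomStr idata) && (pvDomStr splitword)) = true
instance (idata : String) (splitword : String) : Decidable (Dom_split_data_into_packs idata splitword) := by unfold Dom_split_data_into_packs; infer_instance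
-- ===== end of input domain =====

-- B restructures A's single search-and-slice loop into two passes (collect all
-- boundary positions, then slice between consecutive positions); same values, same cost.

-- ===== PORT A =====
-- A's while-loop: p2 = find(splitword, p+1); on -1 append idata[p:len] and stop,
-- else append idata[p:p2] and continue from p2.  Fuel bounds the iterations; the
-- positions strictly increase, so fuel = len + 2 is never exhausted.
def pvALoop (idata sw : List Char) (fuel : Nat) (p : Int) : List (List Char) :=
  match fuel with
  | 0 => []
  | f + 1 =>
    let p2 := PySem.Chars.findFrom idata sw (p + 1)
    if p2 = -1 then
      [PySem.Chars.slice idata (some p) (some (idata.length : Int))]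
    else
      PySem.Chars.slice idata (some p) (some p2) :: pvALoop idata sw f p2

def split_data_into_packs (idata : String) (splitword : String) : List String :=
  (pvALoop idata.toList splitword.toList (idata.toList.length + 2)
      (PySem.Chars.find idata.toList splitword.toList)).map String.ofList

-- ===== PORT B =====
-- Source B pass 1: positions = [first find, every later find, len(idata)]
def pvBPos (idata sw : List Char) (fuel : Nat) (p : Int) : List Int :=
  match fuel with
  | 0 => [p]
  | f + 1 =>
    let q := PySem.Chars.findFrom idata sw (p + 1)
    if q = -1 then [p, (idata.length : Int)] else p :: pvBPos idata sw f q

-- Source B pass 2: [idata[pos[i]:pos[i+1]] for i in range(len(pos)-1)]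
def pvBSlices (idata : List Char) : List Int → List (List Char)
  | [] => []
  | [_] => []
  | a :: b :: rest => PySem.Chars.slice idata (some a) (some b) :: pvBSlices idata (b :: rest)

def split_data_into_packs_alt (idata : String) (splitword : String) : List String :=
  (pvBSlices idata.toList
      (pvBPos idata.toList splitword.toList (idata.toList.length + 2)
        (PySem.Chars.find idata.toList splitword.toList))).map String.ofList

-- ===== PRECONDITION & SPEC =====
def Spec_split_data_into_packs (idata : String) (splitword : String) (out : List String) : Prop := out = split_data_into_packs_alt idata splitword
instance (idata : String) (splitword : String) (out : List String) : Decidable (Spec_split_data_into_packs idata splitword out) := by unfold Spec_split_data_into_packs; infer_instance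

-- ===== CLAIM (what is proved, stated in full; the proofs are below) =====
def Claim_equal_split_data_into_packs : Prop := ∀ (idata : String) (splitword : String), Dom_split_data_into_packs idata splitword → Spec_split_data_into_packs idata splitword (split_data_into_packs idata splitword)

-- ===== LEMMAS AND PROOFS =====

theorem pvBPos_cons (idata sw : List Char) (fuel : Nat) (p : Int) :
    ∃ rest, pvBPos idata sw fuel p = p :: rest := by
  cases fuel with
  | zero => exact ⟨[], rfl⟩
  | succ f =>
    unfold pvBPos
    by_cases h : PySem.Chars.findFrom idata sw (p + 1) = -1 <;> simp [h]

theorem pvBSlices_pvBPos (idata sw : List Char) (fuel : Nat) (p : Int) :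
    pvBSlices idata (pvBPos idata sw fuel p) = pvALoop idata sw fuel p := by
  induction fuel generalizing p with
  | zero => rfl
  | succ f ih =>
    unfold pvBPos pvALoop
    by_cases h : PySem.Chars.findFrom idata sw (p + 1) = -1
    · simp [h, pvBSlices]
    · simp only [h, if_false]
      obtain ⟨rest, hr⟩ := pvBPos_cons idata sw f (PySem.Chars.findFrom idata sw (p + 1))
      rw [hr, pvBSlices, ← hr, ih]

-- ===== VERDICT (by name: the statement is the Claim_ definition above) =====
theorem split_data_into_packs_spec : Claim_equal_split_data_into_packs := by
  intro idata splitword _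
  unfold Spec_split_data_into_packs split_data_into_packs split_data_into_packs_alt
  rw [pvBSlices_pvBPos]
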